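-- pv_equiv track=rewrite | github.com/Clay-Ferguson/quantizr | common/python/agent/app_agent.py | parse_prompt_and_code
-- ===== SOURCE A (Python) =====
-- def parse_prompt_and_code(prompt: str) -> tuple[str, str]:
--     """Takes the prompt and divides it at the line containing a '-' character (if there is one)
--     and returns the top half as the prompt, and the bottom half as the code, otherwise the
--     input prompt is sent back as prompt and code sent back as empty string
--     """
--     prompt_lines = prompt.split("\n")
--     prompt = ""
--     code = ""
--     in_code = False
--
--     for line in prompt_lines:
--         if line.strip() == "-":
--             in_code = True
--         elif in_code:
--             code += line + "\n"
--         else: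
--             prompt += line + "\n"
--
--     return prompt, code
-- ===== SOURCE B (Python) =====
-- def parse_prompt_and_code(prompt: str) -> tuple[str, str]:
--     """Locate the first '-' separator line, then slice: lines before it form the
--     prompt, lines after it (with any further '-' separator lines filtered out)
--     form the code; no separator means everything is prompt and code is ''."""
--     lines = prompt.split("\n")
--     idx = next((i for i, l in enumerate(lines) if l.strip() == "-"), -1)
--     if idx == -1:
--         return "".join(l + "\n" for l in lines), ""
--     return ("".join(l + "\n" for l in lines[:idx]),
--             "".join(l + "\n" for l in lines[idx + 1:] if l.strip() != "-"))
-- ===== Notes on version B (the rewrite author's own statement) =====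
-- stated objective: alternative
-- what changed: Replaces the flag-carrying single scan that appends to two string accumulators with a locate-the-first-separator step followed by slice/filter/join of the two halves.
import Mathlib
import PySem

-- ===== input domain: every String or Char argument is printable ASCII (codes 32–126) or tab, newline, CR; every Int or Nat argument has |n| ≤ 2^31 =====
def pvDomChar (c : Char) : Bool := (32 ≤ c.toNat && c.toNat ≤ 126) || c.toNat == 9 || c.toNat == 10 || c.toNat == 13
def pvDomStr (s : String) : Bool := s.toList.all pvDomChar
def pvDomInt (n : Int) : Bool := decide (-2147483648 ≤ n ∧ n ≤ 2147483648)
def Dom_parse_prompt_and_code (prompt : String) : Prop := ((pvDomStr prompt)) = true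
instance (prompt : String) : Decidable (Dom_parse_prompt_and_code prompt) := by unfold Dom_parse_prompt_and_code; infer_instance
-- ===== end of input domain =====

-- B replaces A's flag-based single scan with locate-first-separator, then slice/filter/join (alternative decomposition, same cost).


-- ===== PORT A =====
-- the for-loop over prompt_lines with state (prompt, code, in_code); accumulators kept as List Char
def ppcLoopA : List (List Char) → List Char → List Char → Bool → List Char × List Char
  | [], p, c, _ => (p, c)
  | l :: ls, p, c, inCode =>
    if PySem.Chars.strip l = ['-'] then ppcLoopA ls p c true
    else if inCode then ppcLoopA ls p (c ++ l ++ ['\n']) inCode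
    else ppcLoopA ls (p ++ l ++ ['\n']) c inCode

def parse_prompt_and_code (prompt : String) : String × String :=
  let prompt_lines := PySem.Chars.splitOn prompt.toList "\n".toList
  let r := ppcLoopA prompt_lines [] [] false
  (String.ofList r.1, String.ofList r.2)

-- ===== PORT B =====
-- "".join(l + "\n" for l in ls)
def ppcJoin (ls : List (List Char)) : List Char := ls.flatMap (fun l => l ++ ['\n'])

def parse_prompt_and_code_alt (prompt : String) : String × String :=
  let lines := PySem.Chars.splitOn prompt.toList "\n".toList
  -- next((i for i, l in enumerate(lines) if l.strip() == "-"), -1), with the -1 sentinel as none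
  match lines.findIdx? (fun l => PySem.Chars.strip l == ['-']) with
  | none => (String.ofList (ppcJoin lines), "")
  | some i =>
    -- lines[:i] and lines[i+1:] are nonnegative-bound slices = take/drop
    (String.ofList (ppcJoin (lines.take i)),
     String.ofList (ppcJoin ((lines.drop (i + 1)).filter (fun l => !(PySem.Chars.strip l == ['-'])))))

-- ===== PRECONDITION & SPEC =====
def Spec_parse_prompt_and_code (prompt : String) (out : String × String) : Prop := out = parse_prompt_and_code_alt prompt
instance (prompt : String) (out : String × String) : Decidable (Spec_parse_prompt_and_code prompt out) := by unfold Spec_parse_prompt_and_code; infer_instance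

-- ===== CLAIM (what is proved, stated in full; the proofs are below) =====
def Claim_equal_parse_prompt_and_code : Prop := ∀ (prompt : String), Dom_parse_prompt_and_code prompt → Spec_parse_prompt_and_code prompt (parse_prompt_and_code prompt)

-- ===== LEMMAS AND PROOFS =====

-- once in_code is true, A appends exactly the non-separator lines to code
lemma ppcLoopA_true (ls : List (List Char)) (p c : List Char) :
    ppcLoopA ls p c true =
      (p, c ++ ppcJoin (ls.filter (fun l => !(PySem.Chars.strip l == ['-'])))) := by
  induction ls generalizing c with
  | nil => simp [ppcLoopA, ppcJoin]
  | cons l ls ih =>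
    by_cases h : PySem.Chars.strip l = ['-'] <;>
      simp [ppcLoopA, h, ih, ppcJoin]

-- A's loop in the in_code = false phase, characterised by the first separator index
lemma ppcLoopA_false (ls : List (List Char)) (p c : List Char) :
    ppcLoopA ls p c false =
      match ls.findIdx? (fun l => PySem.Chars.strip l == ['-']) with
      | none => (p ++ ppcJoin ls, c)
      | some i =>
        (p ++ ppcJoin (ls.take i),
         c ++ ppcJoin ((ls.drop (i + 1)).filter (fun l => !(PySem.Chars.strip l == ['-'])))) := by
  induction ls generalizing p with
  | nil => simp [ppcLoopA, ppcJoin]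
  | cons l ls ih =>
    by_cases h : PySem.Chars.strip l = ['-']
    · simp [ppcLoopA, h, ppcLoopA_true, List.findIdx?_cons, ppcJoin]
    · simp only [ppcLoopA, ih,
        List.findIdx?_cons, beq_iff_eq, h]
      cases hf : ls.findIdx? (fun l => PySem.Chars.strip l == ['-']) with
      | none => simp [ppcJoin]
      | some i => simp [ppcJoin, List.take_succ_cons, List.drop_succ_cons]

-- ===== VERDICT (by name: the statement is the Claim_ definition above) =====
theorem parse_prompt_and_code_spec : Claim_equal_parse_prompt_and_code := by
  intro prompt _
  unfold Spec_parse_prompt_and_code parse_prompt_and_code parse_prompt_and_code_alt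
  simp only [ppcLoopA_false]
  cases (PySem.Chars.splitOn prompt.toList "\n".toList).findIdx? (fun l => PySem.Chars.strip l == ['-']) <;> simp
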